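-- pv_equiv track=rewrite | github.com/chiayisu/Natural-Language-Processing | Program/co_matrix_with_dimension_reduction.py | create_word_dict
-- ===== SOURCE A (Python) =====
-- def create_word_dict(corpus):
--     vocab_dict = {}
--     all_word_count = 0
--     for sentence in corpus:
--         for word in sentence:
--             if(word not in vocab_dict):
--                 vocab_dict[word] = all_word_count
--                 all_word_count = all_word_count + 1
--     return vocab_dict
-- ===== SOURCE B (Python) =====
-- def create_word_dict(corpus):
--     flat = [word for sentence in corpus for word in sentence]
--     first = {}
--     for i, word in reversed(list(enumerate(flat))):
--         first[word] = i
--     order = sorted(first, key=first.get)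
--     return {word: i for i, word in enumerate(order)}
-- ===== Notes on version B (the rewrite author's own statement) =====
-- stated objective: alternative
-- what changed: B flattens the corpus, records each word's first-occurrence position by overwriting a dict while scanning the flattened list in reverse, then SORTS the unique words by that position and numbers the sorted list; A instead makes one forward pass assigning indices from a manual counter under a membership guard.
import Mathlib
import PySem

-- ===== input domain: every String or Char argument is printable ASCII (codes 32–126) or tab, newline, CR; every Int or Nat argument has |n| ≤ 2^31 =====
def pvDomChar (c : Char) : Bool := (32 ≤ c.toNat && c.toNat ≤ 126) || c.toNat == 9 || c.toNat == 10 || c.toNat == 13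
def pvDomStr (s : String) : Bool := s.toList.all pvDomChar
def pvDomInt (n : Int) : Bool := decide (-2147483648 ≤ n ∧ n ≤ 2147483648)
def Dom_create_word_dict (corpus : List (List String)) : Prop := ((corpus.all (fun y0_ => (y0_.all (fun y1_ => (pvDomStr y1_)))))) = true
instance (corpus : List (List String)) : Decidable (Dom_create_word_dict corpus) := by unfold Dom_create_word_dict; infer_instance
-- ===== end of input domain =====

-- B sorts the unique words by their first-occurrence index and numbers the sorted list,
-- instead of A's single pass that assigns indices from a manual counter under a membership guard.

-- ===== PORT A =====
-- one step of A's inner loop body: state = (vocab_dict, all_word_count)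
def cwdStep (st : PySem.Dict String Int × Int) (word : String) : PySem.Dict String Int × Int :=
  if st.1.contains word then st else (st.1.insert word st.2, st.2 + 1)

def create_word_dict (corpus : List (List String)) : List (String × Int) :=
  (corpus.foldl (fun st sentence => sentence.foldl cwdStep st) (PySem.Dict.empty, 0)).1.items

-- ===== PORT B =====
-- the reverse-overwrite loop: for i, word in reversed(list(enumerate(flat))): first[word] = i
def cwdFirst (flat : List String) : PySem.Dict String Int :=
  ((PySem.List.enumerate flat 0).reverse).foldl (fun d p => d.insert p.2 p.1) PySem.Dict.empty

-- sorted(first, key=first.get): every key of `first` is present, so first.get w is exactly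
-- some (first.getD w 0); the key is ported as getD with default 0.
def create_word_dict_alt (corpus : List (List String)) : List (String × Int) :=
  let flat := corpus.flatMap (fun sentence => sentence)
  let first := cwdFirst flat
  let order := PySem.List.sorted first.keys (fun w => first.getD w 0) false
  (PySem.List.enumerate order 0).map (fun p => (p.2, p.1))

-- ===== PRECONDITION & SPEC =====
def Spec_create_word_dict (corpus : List (List String)) (out : List (String × Int)) : Prop := out = create_word_dict_alt corpus
instance (corpus : List (List String)) (out : List (String × Int)) : Decidable (Spec_create_word_dict corpus out) := by unfold Spec_create_word_dict; infer_instance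

-- ===== CLAIM (what is proved, stated in full; the proofs are below) =====
def Claim_equal_create_word_dict : Prop := ∀ (corpus : List (List String)), Dom_create_word_dict corpus → Spec_create_word_dict corpus (create_word_dict corpus)

-- ===== LEMMAS AND PROOFS =====

-- the words of `ws` not already in `seen`, first occurrences only, in order of first appearance
def cwdFresh (seen : List String) : List String → List String
  | [] => []
  | w :: ws => if seen.contains w then cwdFresh seen ws else w :: cwdFresh (seen ++ [w]) ws

theorem cwdFresh_eq_foldl_add (ws : List String) (seen : List String) :
    ws.foldl PySem.Set.add seen = seen ++ cwdFresh seen ws := by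
  induction ws generalizing seen with
  | nil => simp [cwdFresh]
  | cons w ws ih =>
    simp only [List.foldl_cons, PySem.Set.add, PySem.Set.contains, cwdFresh]
    by_cases h : w ∈ seen
    · simp [h, ih]
    · simp [h, ih, List.append_assoc]

theorem cwdLoop_items (ws : List String) (d : PySem.Dict String Int) (n : Int)
    (hn : n = (d.size : Int)) :
    (ws.foldl cwdStep (d, n)).1.items
      = d.items ++ (PySem.List.enumerate (cwdFresh d.keys ws) n).map (fun p => (p.2, p.1)) := by
  induction ws generalizing d n with
  | nil => simp [cwdFresh]
  | cons w ws ih =>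
    simp only [List.foldl_cons, cwdStep]
    by_cases h : d.contains w = true
    · have hm : w ∈ d.keys := (PySem.Dict.contains_iff_mem_keys d w).mp h
      simp only [h, if_true, cwdFresh]
      rw [if_pos (by simpa using hm)]
      exact ih d n hn
    · have hb : d.contains w = false := by simpa using h
      have hm : w ∉ d.keys := fun hm => h ((PySem.Dict.contains_iff_mem_keys d w).mpr hm)
      simp only [hb, Bool.false_eq_true, if_false, cwdFresh]
      rw [if_neg (by simpa using hm)]
      have hsz : n + 1 = ((d.insert w n).size : Int) := by
        rw [PySem.Dict.size_insert]
        simp only [hb, Bool.false_eq_true, if_false]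
        push_cast
        omega
      rw [ih (d.insert w n) (n + 1) hsz,
          PySem.Dict.items_insert_of_not_contains d n hb,
          PySem.Dict.keys_insert_of_not_contains d n hb,
          PySem.List.enumerate_cons]
      simp [List.append_assoc]

theorem cwd_dedup_eq_fresh (ws : List String) :
    PySem.List.dedup ws = cwdFresh ([] : List String) ws := by
  rw [PySem.List.dedup_eq_ofList, PySem.Set.ofList_eq_foldl]
  simpa using cwdFresh_eq_foldl_add ws []

-- every fresh word avoids `seen`
theorem cwdFresh_not_mem_seen (ws : List String) (seen : List String) :
    ∀ a ∈ cwdFresh seen ws, a ∉ seen := by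
  induction ws generalizing seen with
  | nil => simp [cwdFresh]
  | cons w ws ih =>
    intro a ha
    simp only [cwdFresh] at ha
    by_cases h : seen.contains w
    · rw [if_pos h] at ha
      exact ih seen a ha
    · rw [if_neg h] at ha
      rcases List.mem_cons.mp ha with rfl | ha
      · simpa using h
      · intro hs
        exact ih (seen ++ [w]) a ha (by simp [hs])

-- the first occurrences appear in strictly increasing index order
theorem cwdFresh_pairwise_idxOf (ws : List String) (seen : List String) :
    (cwdFresh seen ws).Pairwise (fun a b => ws.idxOf a < ws.idxOf b) := by
  induction ws generalizing seen with
  | nil => simp [cwdFresh]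
  | cons w ws ih =>
    simp only [cwdFresh]
    by_cases h : seen.contains w
    · rw [if_pos h]
      refine (ih seen).imp_of_mem ?_
      intro a b ha hb hab
      have hw : w ∈ seen := by simpa using h
      have hane : a ≠ w := fun e => cwdFresh_not_mem_seen ws seen a ha (e ▸ hw)
      have hbne : b ≠ w := fun e => cwdFresh_not_mem_seen ws seen b hb (e ▸ hw)
      rw [List.idxOf_cons_ne ws (Ne.symm hane), List.idxOf_cons_ne ws (Ne.symm hbne)]
      omega
    · rw [if_neg h]
      refine List.Pairwise.cons ?_ ?_
      · intro b hb
        have hbne : b ≠ w := fun e => by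
          have := cwdFresh_not_mem_seen ws (seen ++ [w]) b hb
          simp [e] at this
        rw [List.idxOf_cons_self, List.idxOf_cons_ne ws (Ne.symm hbne)]
        omega
      · refine (ih (seen ++ [w])).imp_of_mem ?_
        intro a b ha hb hab
        have hane : a ≠ w := fun e => by
          have := cwdFresh_not_mem_seen ws (seen ++ [w]) a ha; simp [e] at this
        have hbne : b ≠ w := fun e => by
          have := cwdFresh_not_mem_seen ws (seen ++ [w]) b hb; simp [e] at this
        rw [List.idxOf_cons_ne ws (Ne.symm hane), List.idxOf_cons_ne ws (Ne.symm hbne)]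
        omega


-- in a fold of inserts the LAST write to a key wins
theorem cwd_get?_foldl_insert (ps : List (Int × String)) (d : PySem.Dict String Int) (w : String) :
    (ps.foldl (fun d p => d.insert p.2 p.1) d).get? w =
      match ps.reverse.find? (fun p => p.2 == w) with
      | some p => some p.1
      | none => d.get? w := by
  induction ps generalizing d with
  | nil => simp
  | cons p t ih =>
    simp only [List.foldl_cons, List.reverse_cons, List.find?_append, ih]
    cases h : t.reverse.find? (fun q => q.2 == w) with
    | some q => simp
    | none =>
      simp only [Option.none_or]
      by_cases hp : p.2 = w
      · subst hp
        simp [List.find?, PySem.Dict.get?_insert_self]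
      · have hb : (p.2 == w) = false := by simpa using hp
        simp [List.find?, hb, PySem.Dict.get?_insert_of_ne d p.1 (Ne.symm hp)]

theorem cwd_find?_enumerate (xs : List String) (s : Int) (w : String) (hw : w ∈ xs) :
    (PySem.List.enumerate xs s).find? (fun p => p.2 == w) = some (s + (xs.idxOf w : Int), w) := by
  induction xs generalizing s with
  | nil => cases hw
  | cons x t ih =>
    rw [PySem.List.enumerate_cons]
    by_cases hx : x = w
    · subst hx
      simp [List.find?, List.idxOf_cons_self]
    · have hw' : w ∈ t := by
        rcases List.mem_cons.mp hw with rfl | h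
        · exact absurd rfl hx
        · exact h
      rw [List.find?_cons_of_neg (by simpa using hx), ih (s + 1) hw',
          List.idxOf_cons_ne t hx]
      congr 2
      push_cast
      ring

-- the dict records each word's FIRST occurrence index
theorem cwd_first_getD (flat : List String) (w : String) (hw : w ∈ flat) :
    (cwdFirst flat).getD w 0 = (flat.idxOf w : Int) := by
  rw [cwdFirst, PySem.Dict.getD_eq_get?_getD, cwd_get?_foldl_insert, List.reverse_reverse,
      cwd_find?_enumerate flat 0 w hw]
  simp

theorem cwd_first_keys (flat : List String) :
    (cwdFirst flat).keys = PySem.Set.ofList flat.reverse := by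
  have h := PySem.Dict.keys_foldl_insert_key (l := (PySem.List.enumerate flat 0).reverse)
    (key := fun p : Int × String => p.2) (f := fun d p => p.1)
    (d := (PySem.Dict.empty : PySem.Dict String Int))
  rw [cwdFirst, h]
  simp [PySem.Set.update, PySem.Set.ofList_eq_foldl, PySem.Dict.keys_empty,
        PySem.List.map_snd_enumerate]

theorem cwd_first_keys_nodup (flat : List String) : (cwdFirst flat).keys.Nodup := by
  rw [cwd_first_keys]
  exact PySem.Set.nodup_ofList _

theorem cwd_mem_first_keys (flat : List String) (w : String) :
    w ∈ (cwdFirst flat).keys ↔ w ∈ flat := by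
  rw [cwd_first_keys, PySem.Set.mem_ofList, List.mem_reverse]

-- sorting the recorded words by first-occurrence position recovers the first-occurrence dedup order
theorem cwd_sorted_eq_dedup (flat : List String) :
    PySem.List.sorted (cwdFirst flat).keys (fun w => (cwdFirst flat).getD w 0) false
      = PySem.List.dedup flat := by
  apply PySem.List.sorted_eq_of_perm_of_pairwise_lt (key := fun w => (cwdFirst flat).getD w 0)
  · refine (List.perm_ext_iff_of_nodup (PySem.List.nodup_dedup flat) (cwd_first_keys_nodup flat)).mpr ?_
    intro a
    rw [PySem.List.mem_dedup, cwd_mem_first_keys]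
  · rw [cwd_dedup_eq_fresh]
    refine (cwdFresh_pairwise_idxOf flat []).imp_of_mem ?_
    intro a b ha hb hab
    have haf : a ∈ flat := by
      rw [← cwd_dedup_eq_fresh] at ha
      exact (PySem.List.mem_dedup flat a).mp ha
    have hbf : b ∈ flat := by
      rw [← cwd_dedup_eq_fresh] at hb
      exact (PySem.List.mem_dedup flat b).mp hb
    rw [cwd_first_getD flat a haf, cwd_first_getD flat b hbf]
    exact_mod_cast hab

-- ===== VERDICT (by name: the statement is the Claim_ definition above) =====
theorem create_word_dict_spec : Claim_equal_create_word_dict := by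
  intro corpus _
  unfold Spec_create_word_dict create_word_dict create_word_dict_alt
  have hflat : corpus.foldl (fun st sentence => sentence.foldl cwdStep st) (PySem.Dict.empty, 0)
      = (corpus.flatMap (fun sentence => sentence)).foldl cwdStep (PySem.Dict.empty, 0) := by
    rw [List.flatMap_def, List.foldl_flatten]
    simp
  rw [hflat, cwdLoop_items _ _ _ (by simp [PySem.Dict.size_empty])]
  simp only [cwd_sorted_eq_dedup, cwd_dedup_eq_fresh]
  simp [PySem.Dict.empty]
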